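-- pv_equiv track=rewrite | github.com/marfsama/binaryread | binaryread/tools.py | stream_bits
-- ===== SOURCE A (Python) =====
-- def stream_bits(byte_stream, num_bits=1):
--     """Iterates over the byte stream, returning num_bits in each iteration."""
--     bits_still_needed = num_bits
--     current_value = 0
--     for b in byte_stream:
--         available_bits = 8
--         while available_bits > 0:
--             # calculate number of usable bits in current byte
--             copy_bits = min(bits_still_needed, available_bits)
--             shift_bits = available_bits - copy_bits
--             # shift used bits to start of number
--             copy_value = b >> shift_bits
--             # add current bits to result
--             current_value = (current_value << copy_bits) + copy_value
--             # calculate bitmask to delete used bits in current byte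
--             bit_mask = (1 << shift_bits) - 1
--             # reduce needed bits by used bits, mask used bits in current byte
--             bits_still_needed = bits_still_needed - copy_bits
--             b = b & bit_mask
--             available_bits = available_bits - copy_bits
--             # all required bits gatherd?
--             if bits_still_needed == 0:
--                 # yield the bits
--                 yield current_value
--                 # reset current result and reset the number of needed bits
--                 current_value = 0
--                 bits_still_needed = num_bits
--
--     # do we have some partial bits processed? yield those
--     if bits_still_needed < num_bits:
--         yield current_value
-- ===== SOURCE B (Python) =====
-- def stream_bits(byte_stream, num_bits=1):
--     """Iterates over the byte stream, returning num_bits in each iteration."""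
--     if num_bits < 1:
--         raise ValueError("num_bits must be a positive integer")
--     value = 0
--     count = 0
--     for b in byte_stream:
--         for i in range(7, -1, -1):
--             value = (value << 1) + (b >> i)  # take the top remaining bit of the byte
--             b &= (1 << i) - 1                # strip it
--             count += 1
--             if count == num_bits:
--                 yield value
--                 value = 0
--                 count = 0
--     if count > 0:
--         yield value
-- ===== Notes on version B (the rewrite author's own statement) =====
-- stated objective: simpler
-- what changed: B replaces A's chunked min/shift/mask arithmetic (inner while-loop taking variable-width chunks of up to 8 bits with bits_still_needed/available_bits bookkeeping) by a one-bit-at-a-time loop: it peels the top remaining bit of each byte into an accumulator with a counter, yields when the counter reaches num_bits, and yields the partial group at the end; num_bits < 1 is rejected up front with ValueError. Pre_ excludes num_bits < 1, where A loops forever or raises on any non-empty stream and only accidentally returns [] on an empty one, while B raises ValueError up front.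
-- outside the precondition, e.g. on stream_bits([], 0): A returns [], B raises ValueError; on stream_bits([], -1): A returns [], B raises ValueError
import Mathlib
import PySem

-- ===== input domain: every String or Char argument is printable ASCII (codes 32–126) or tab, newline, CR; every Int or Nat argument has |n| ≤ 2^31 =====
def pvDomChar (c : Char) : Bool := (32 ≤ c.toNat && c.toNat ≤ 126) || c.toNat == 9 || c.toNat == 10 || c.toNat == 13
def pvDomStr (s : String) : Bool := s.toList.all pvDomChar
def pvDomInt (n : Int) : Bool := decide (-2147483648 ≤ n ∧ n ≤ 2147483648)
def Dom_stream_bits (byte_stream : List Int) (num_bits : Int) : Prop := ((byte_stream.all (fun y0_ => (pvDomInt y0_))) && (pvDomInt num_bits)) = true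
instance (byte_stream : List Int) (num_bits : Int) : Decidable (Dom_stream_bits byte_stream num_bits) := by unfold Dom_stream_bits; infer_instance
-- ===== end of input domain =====

-- B replaces A's chunked min/shift/mask arithmetic by a one-bit-at-a-time loop (simpler decomposition, same cost).

-- ===== PORT A =====
-- A's inner `while available_bits > 0` loop; the fuel argument bounds the iterations (8 suffices:
-- under Pre_ each pass consumes copy_bits ≥ 1 of the 8 available bits, so the loop runs ≤ 8 times).
-- Shift counts are ≥ 0 whenever the Python runs without error (num_bits ≥ 1), so `.toNat` is exact there.
def streamBitsInner (num_bits : Int) : Nat → Int → Int → Int → Int → List Int → Int × Int × List Int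
  | 0, _b, _avail, bsn, cur, out => (bsn, cur, out)
  | fuel+1, b, avail, bsn, cur, out =>
    if avail > 0 then
      let copy_bits := min bsn avail
      let shift_bits := avail - copy_bits
      let copy_value := b >>> shift_bits.toNat
      let cur' := (cur <<< copy_bits.toNat) + copy_value
      let bit_mask := ((1:Int) <<< shift_bits.toNat) - 1
      let bsn' := bsn - copy_bits
      let b' := PySem.Int.band b bit_mask
      let avail' := avail - copy_bits
      if bsn' = 0 then
        streamBitsInner num_bits fuel b' avail' num_bits 0 (out ++ [cur'])
      else
        streamBitsInner num_bits fuel b' avail' bsn' cur' out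
    else (bsn, cur, out)

def stream_bits (byte_stream : List Int) (num_bits : Int) : List Int :=
  let s := byte_stream.foldl
    (fun (st : Int × Int × List Int) b => streamBitsInner num_bits 8 b 8 st.1 st.2.1 st.2.2)
    (num_bits, 0, ([] : List Int))
  if s.1 < num_bits then s.2.2 ++ [s.2.1] else s.2.2

-- ===== PORT B =====
-- one byte of B: `for i in range(7, -1, -1)` peeling the top remaining bit; fold state (b, value, count, out)
def altByteStep (num_bits : Int) (st : Int × Int × List Int) (b : Int) : Int × Int × List Int :=
  let r := (PySem.List.pyRange 7 (-1) (-1)).foldl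
    (fun (s : Int × Int × Int × List Int) i =>
      let v := (s.2.1 <<< (1:Nat)) + (s.1 >>> i.toNat)
      let b' := PySem.Int.band s.1 (((1:Int) <<< i.toNat) - 1)
      let c := s.2.2.1 + 1
      if c = num_bits then (b', 0, 0, s.2.2.2 ++ [v]) else (b', v, c, s.2.2.2))
    (b, st.1, st.2.1, st.2.2)
  (r.2.1, r.2.2.1, r.2.2.2)

def stream_bits_alt (byte_stream : List Int) (num_bits : Int) : List Int :=
  -- Source B raises ValueError for num_bits < 1; those inputs are outside Pre_ and the port returns [] there
  if num_bits < 1 then []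
  else
    let s := byte_stream.foldl (altByteStep num_bits) (0, 0, ([] : List Int))
    if s.2.1 > 0 then s.2.2 ++ [s.1] else s.2.2

-- ===== PRECONDITION & SPEC =====
-- Pre_ excludes num_bits < 1, where A loops forever (num_bits = 0) or raises ValueError on any
-- non-empty stream and only accidentally returns [] on an empty one, while B raises ValueError up front.
def Pre_stream_bits (byte_stream : List Int) (num_bits : Int) : Prop := 1 ≤ num_bits
instance (byte_stream : List Int) (num_bits : Int) : Decidable (Pre_stream_bits byte_stream num_bits) := by unfold Pre_stream_bits; infer_instance

def pvWitness_stream_bits : List Int × Int := ([255, 7], 3)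

def Spec_stream_bits (byte_stream : List Int) (num_bits : Int) (out : List Int) : Prop := out = stream_bits_alt byte_stream num_bits
instance (byte_stream : List Int) (num_bits : Int) (out : List Int) : Decidable (Spec_stream_bits byte_stream num_bits out) := by unfold Spec_stream_bits; infer_instance

-- ===== CLAIM (what is proved, stated in full; the proofs are below) =====
def Claim_equal_stream_bits : Prop := ∀ (byte_stream : List Int) (num_bits : Int), Dom_stream_bits byte_stream num_bits → Pre_stream_bits byte_stream num_bits → Spec_stream_bits byte_stream num_bits (stream_bits byte_stream num_bits)

-- ===== LEMMAS AND PROOFS =====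

-- arithmetic model of B's inner bit loop: peel bit k-1 down to bit 0, state (b, value, count, out)
def nBit (num_bits : Int) : Nat → Int → Int → Int → List Int → Int × Int × Int × List Int
  | 0, b, v, c, out => (b, v, c, out)
  | k+1, b, v, c, out =>
    if c + 1 = num_bits then nBit num_bits k (b % 2^k) 0 0 (out ++ [2*v + b / 2^k])
    else nBit num_bits k (b % 2^k) (2*v + b / 2^k) (c+1) out

-- Python's `b & ((1 << s) - 1)` is the floor remainder b % 2^s, for EVERY integer b
lemma band_mask_eq (b : Int) (s : Nat) : PySem.Int.band b ((1:Int) <<< s - 1) = b % 2^s := by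
  have h1 : ((1:Int) <<< s - 1) = 2^s - 1 := by rw [Int.shiftLeft_eq]; ring
  rw [h1]
  have hp : (0:Int) < 2^s := by positivity
  have hP : (((2^s : Nat) : Int)) = 2^s := by push_cast; rfl
  by_cases hb : 0 ≤ b
  · simp only [PySem.Int.band, if_pos hb, if_pos (show (0:Int) ≤ 2^s - 1 by omega)]
    rw [show ((2:Int)^s - 1).toNat = 2^s - 1 from by omega, Nat.and_two_pow_sub_one_eq_mod]
    push_cast
    rw [Int.toNat_of_nonneg hb]
  · simp only [PySem.Int.band, if_neg hb]
    rw [if_pos (show (0:Int) ≤ 2^s - 1 by omega)]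
    rw [show ((2:Int)^s - 1).toNat = 2^s - 1 from by omega]
    rw [Nat.and_comm, Nat.and_two_pow_sub_one_eq_mod]
    set mN := (-b - 1).toNat with hmN
    have hcast : ((2^s - 1 - mN % 2^s : Nat) : Int) = 2^s - 1 - ((mN:Int) % 2^s) := by
      have hlt : mN % 2^s < 2^s := Nat.mod_lt _ (by positivity)
      have h2 : ((mN % 2^s : Nat) : Int) = (mN:Int) % 2^s := by push_cast; rfl
      rw [Nat.cast_sub (by omega), Nat.cast_sub Nat.one_le_two_pow, hP, h2]; norm_num
    rw [hcast]
    set m := ((mN : Nat) : Int) with hm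
    have hm0 : (0:Int) ≤ m := by positivity
    have hmb : b = -1 - m := by omega
    set r := m % 2^s with hr
    have hr0 : 0 ≤ r := Int.emod_nonneg m (by positivity)
    have hrlt : r < 2^s := Int.emod_lt_of_pos m hp
    have hqr : m = 2^s * (m / 2^s) + r := by rw [hr]; exact (Int.ediv_add_emod m (2^s)).symm
    have hsplit : b = (2^s - 1 - r) + 2^s * (-(m / 2^s) - 1) := by
      rw [hmb]; linear_combination -hqr
    rw [show b % 2^s = ((2^s - 1 - r) + 2^s * (-(m / 2^s) - 1)) % 2^s from by rw [← hsplit]]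
    rw [Int.add_mul_emod_self_left, Int.emod_eq_of_lt (by omega) (by omega)]

-- the ports' Python shifts with a `.toNat` count, as division/multiplication
lemma shiftR_eq (b x : Int) : b >>> (x.toNat : Nat) = b / 2^(x.toNat) := by
  rw [Int.shiftRight_eq_div_pow]; push_cast; rfl

lemma shiftL_eq (b x : Int) : b <<< (x.toNat : Nat) = b * 2^(x.toNat) := by
  rw [Int.shiftLeft_eq]

lemma shiftR_nat (b : Int) (k : Nat) : b >>> k = b / 2^k := by
  rw [Int.shiftRight_eq_div_pow]; push_cast; rfl

lemma shiftL1 (v : Int) : v <<< (1:Nat) = 2*v := by rw [Int.shiftLeft_eq]; ring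

-- splitting a floor division at an intermediate power of two (every integer b)
lemma div_split (b : Int) (s j : Nat) :
    b / 2^(s+j) * 2^j + (b % 2^(s+j)) / 2^s = b / 2^s := by
  have hq : b = (2^s * 2^j) * (b / 2^(s+j)) + b % 2^(s+j) := by
    rw [show (2:Int)^s * 2^j = 2^(s+j) from (pow_add 2 s j).symm]
    exact (Int.ediv_add_emod b (2^(s+j))).symm
  conv_rhs => rw [hq]
  rw [show (2^s * 2^j) * (b / 2^(s+j)) + b % 2^(s+j)
        = b % 2^(s+j) + (2^j * (b / 2^(s+j))) * 2^s from by ring,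
    Int.add_mul_ediv_right _ _ (show (2:Int)^s ≠ 0 from by positivity)]
  ring

lemma nBit_succ_yield (n b v c : Int) (k : Nat) (out : List Int) (h : c + 1 = n) :
    nBit n (k+1) b v c out = nBit n k (b % 2^k) 0 0 (out ++ [2*v + b / 2^k]) := by
  simp only [nBit]; rw [if_pos h]

lemma nBit_succ_go (n b v c : Int) (k : Nat) (out : List Int) (h : ¬ (c + 1 = n)) :
    nBit n (k+1) b v c out = nBit n k (b % 2^k) (2*v + b / 2^k) (c+1) out := by
  simp only [nBit]; rw [if_neg h]

-- nBit keeps the count in [0, num_bits)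
lemma nBit_inv (num_bits : Int) : ∀ (k : Nat) (b v c : Int) (out : List Int),
    0 ≤ c → c < num_bits →
    0 ≤ (nBit num_bits k b v c out).2.2.1 ∧ (nBit num_bits k b v c out).2.2.1 < num_bits := by
  intro k
  induction k with
  | zero => intro b v c out hc hcn; exact ⟨hc, hcn⟩
  | succ k ih =>
    intro b v c out hc hcn
    by_cases h : c + 1 = num_bits
    · rw [nBit_succ_yield _ _ _ _ _ _ h]; exact ih _ _ _ _ le_rfl (by omega)
    · rw [nBit_succ_go _ _ _ _ _ _ h]; exact ih _ _ _ _ (by omega) (by omega)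

-- the index list [k-1, …, 0] that B's `range(7,-1,-1)` produces for k = 8
def idxList : Nat → List Int
  | 0 => []
  | k+1 => (k:Int) :: idxList k

lemma foldl_idx_eq_nBit (num_bits : Int) : ∀ (k : Nat) (b v c : Int) (out : List Int),
    (idxList k).foldl
      (fun (s : Int × Int × Int × List Int) i =>
        let v := (s.2.1 <<< (1:Nat)) + (s.1 >>> i.toNat)
        let b' := PySem.Int.band s.1 (((1:Int) <<< i.toNat) - 1)
        let c := s.2.2.1 + 1
        if c = num_bits then (b', 0, 0, s.2.2.2 ++ [v]) else (b', v, c, s.2.2.2)) (b, v, c, out)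
      = nBit num_bits k b v c out := by
  intro k
  induction k with
  | zero => intro b v c out; rfl
  | succ k ih =>
    intro b v c out
    rw [show idxList (k+1) = (k:Int) :: idxList k from rfl, List.foldl_cons]
    dsimp only
    rw [Int.toNat_natCast k, Int.shiftRight_natCast_right b k, shiftR_nat b k,
      Int.shiftLeft_natCast_right 1 k, band_mask_eq b k, shiftL1 v]
    by_cases h : c + 1 = num_bits
    · rw [if_pos h, nBit_succ_yield _ _ _ _ _ _ h]; exact ih _ _ _ _
    · rw [if_neg h, nBit_succ_go _ _ _ _ _ _ h]; exact ih _ _ _ _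

lemma altByteStep_eq_nBit (num_bits b v c : Int) (out : List Int) :
    altByteStep num_bits (v, c, out) b
      = ((nBit num_bits 8 b v c out).2.1, (nBit num_bits 8 b v c out).2.2.1,
         (nBit num_bits 8 b v c out).2.2.2) := by
  have hlist : PySem.List.pyRange 7 (-1) (-1) = idxList 8 := by decide
  rw [altByteStep, hlist]
  rw [foldl_idx_eq_nBit num_bits 8 b v c out]

-- j+1 bit-steps with no group boundary inside take one chunk of j+1 bits off the top
lemma nBit_chunk (num_bits : Int) : ∀ (j k : Nat) (b v c : Int) (out : List Int),
    j+1 ≤ k → ((j:Int)+1) < num_bits - c →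
    nBit num_bits k b v c out
      = nBit num_bits (k-(j+1)) (b % 2^(k-(j+1))) (v * 2^(j+1) + b / 2^(k-(j+1))) (c + ((j:Int)+1)) out := by
  intro j
  induction j with
  | zero =>
    intro k b v c out hjk hcj
    obtain ⟨s, rfl⟩ : ∃ s:Nat, k = s + 1 := ⟨k-1, by omega⟩
    rw [nBit_succ_go _ _ _ _ _ _ (by omega)]
    norm_num
    ring_nf
  | succ j ih =>
    intro k b v c out hjk hcj
    obtain ⟨s, rfl⟩ : ∃ s:Nat, k = s + 1 := ⟨k-1, by omega⟩
    rw [nBit_succ_go _ _ _ _ _ _ (by push_cast at hcj; omega)]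
    rw [ih s (b % 2^s) (2*v + b / 2^s) (c+1) out (by omega) (by push_cast at hcj ⊢; omega)]
    have hss : s + 1 - (j+1+1) = s - (j+1) := by omega
    have hmask : b % 2^s % 2^(s-(j+1)) = b % 2^(s-(j+1)) :=
      Int.emod_emod_of_dvd b (pow_dvd_pow 2 (by omega))
    have hdiv : (2*v + b / 2^s) * 2^(j+1) + (b % 2^s) / 2^(s-(j+1))
        = v * 2^(j+1+1) + b / 2^(s-(j+1)) := by
      have hd := div_split b (s-(j+1)) (j+1)
      rw [show s-(j+1)+(j+1) = s from by omega] at hd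
      calc (2*v + b / 2^s) * 2^(j+1) + (b % 2^s) / 2^(s-(j+1))
          = v * (2^(j+1) * 2) + (b / 2^s * 2^(j+1) + (b % 2^s) / 2^(s-(j+1))) := by ring
        _ = v * 2^(j+1+1) + b / 2^(s-(j+1)) := by rw [hd]; ring
    rw [hss, hmask, hdiv]
    congr 1
    push_cast
    ring

-- main per-byte lemma: A's chunked while-loop = B's bit loop, through the state map
-- (bits_still_needed, current_value) = (num_bits - count, value)
lemma inner_eq (num_bits : Int) : ∀ (k fuel : Nat) (b bsn cur : Int) (out : List Int),
    k ≤ fuel → 1 ≤ bsn → bsn ≤ num_bits →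
    streamBitsInner num_bits fuel b (k:Int) bsn cur out
      = (fun s => (num_bits - s.2.2.1, s.2.1, s.2.2.2)) (nBit num_bits k b cur (num_bits - bsn) out) := by
  intro k
  induction k using Nat.strong_induction_on with
  | _ k IH =>
  intro fuel b bsn cur out hkf h1 h2
  match k, fuel with
  | 0, 0 => simp [streamBitsInner, nBit, sub_sub_cancel]
  | 0, f+1 => simp [streamBitsInner, nBit, sub_sub_cancel]
  | t+1, 0 => omega
  | t+1, f+1 =>
    have havail : ((0:Int) < ((t+1:Nat):Int)) := by push_cast; omega
    rw [show streamBitsInner num_bits (f+1) b ((t+1:Nat):Int) bsn cur out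
          = (let copy_bits := min bsn ((t+1:Nat):Int)
             let shift_bits := ((t+1:Nat):Int) - copy_bits
             let copy_value := b >>> shift_bits.toNat
             let cur' := (cur <<< copy_bits.toNat) + copy_value
             let bit_mask := ((1:Int) <<< shift_bits.toNat) - 1
             let bsn' := bsn - copy_bits
             let b' := PySem.Int.band b bit_mask
             let avail' := ((t+1:Nat):Int) - copy_bits
             if bsn' = 0 then
               streamBitsInner num_bits f b' avail' num_bits 0 (out ++ [cur'])
             else
               streamBitsInner num_bits f b' avail' bsn' cur' out)
        from by simp only [streamBitsInner]; rw [if_pos havail]]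
    by_cases hcase : bsn ≤ ((t+1:Nat):Int)
    · -- the whole remaining group fits in this byte: A yields here (copy_bits = bsn)
      obtain ⟨m, rfl⟩ : ∃ m:Nat, bsn = (m:Int) := ⟨bsn.toNat, by omega⟩
      obtain ⟨mm, rfl⟩ : ∃ mm:Nat, m = mm+1 := ⟨m-1, by omega⟩
      have hmk : mm+1 ≤ t+1 := by exact_mod_cast hcase
      dsimp only
      rw [min_eq_left hcase]
      rw [show ((t+1:Nat):Int) - ((mm+1:Nat):Int) = ((t-mm:Nat):Int) from by push_cast; omega]
      simp only [Int.toNat_natCast]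
      rw [shiftR_nat, band_mask_eq b (t-mm), Int.shiftLeft_eq]
      rw [if_pos (show ((mm+1:Nat):Int) - ((mm+1:Nat):Int) = 0 from by ring)]
      rw [IH (t-mm) (by omega) f (b % 2^(t-mm)) num_bits 0
        (out ++ [cur * 2^(mm+1) + b / 2^(t-mm)]) (by omega) (by omega) le_rfl]
      rw [sub_self]
      -- B side
      by_cases hmm : mm = 0
      · subst hmm
        rw [nBit_succ_yield _ _ _ _ _ _ (by push_cast; ring)]
        norm_num
        ring_nf
        exact ⟨trivial, trivial, trivial⟩
      · rw [nBit_chunk num_bits (mm-1) (t+1) b cur (num_bits - ((mm+1:Nat):Int)) out (by omega)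
          (by push_cast; omega)]
        rw [show (((mm-1:Nat)):Int) + 1 = ((mm:Nat):Int) from by push_cast; omega ]
        rw [show t+1-(mm-1+1) = (t-mm)+1 from by omega]
        rw [show ((mm-1:Nat)+1) = mm from by omega]
        rw [nBit_succ_yield _ _ _ _ _ _ (by push_cast; ring)]
        have hmask : b % 2^((t-mm)+1) % 2^(t-mm) = b % 2^(t-mm) :=
          Int.emod_emod_of_dvd b (pow_dvd_pow 2 (by omega))
        have hval : 2*(cur * 2^mm + b / 2^((t-mm)+1)) + (b % 2^((t-mm)+1)) / 2^(t-mm)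
            = cur * 2^(mm+1) + b / 2^(t-mm) := by
          have hd := div_split b (t-mm) 1
          rw [show t-mm+1 = (t-mm)+1 from rfl] at hd
          calc 2*(cur * 2^mm + b / 2^((t-mm)+1)) + (b % 2^((t-mm)+1)) / 2^(t-mm)
              = cur * (2^mm * 2) + (b / 2^((t-mm)+1) * 2^1 + (b % 2^((t-mm)+1)) / 2^(t-mm)) := by ring
            _ = cur * 2^(mm+1) + b / 2^(t-mm) := by rw [hd, pow_succ]
        rw [hmask, hval]
    · -- the byte is consumed whole (copy_bits = available_bits = t+1), no yield
      have hlt : ((t+1:Nat):Int) < bsn := by omega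
      dsimp only
      rw [min_eq_right (le_of_lt hlt)]
      rw [show ((t+1:Nat):Int) - ((t+1:Nat):Int) = 0 from by ring]
      rw [show ((1:Int) <<< (0:Int).toNat - 1) = 0 from by decide, PySem.Int.band_zero]
      rw [show b >>> (0:Int).toNat = b from by rw [shiftR_eq]; norm_num]
      rw [shiftL_eq cur, Int.toNat_natCast]
      rw [if_neg (show ¬ (bsn - ((t+1:Nat):Int) = 0) from by omega)]
      rw [show (0:Int) = ((0:Nat):Int) from rfl]
      rw [IH 0 (by omega) f ((0:Nat):Int) (bsn - ((t+1:Nat):Int)) (cur * 2^(t+1) + b) out (by omega)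
        (by omega) (by omega)]
      rw [nBit_chunk num_bits t (t+1) b cur (num_bits - bsn) out le_rfl (by push_cast; omega)]
      simp only [Nat.sub_self, pow_zero, Int.ediv_one, Int.emod_one, nBit]
      congr 1
      push_cast
      omega

-- fold the per-byte lemma over the stream
lemma fold_eq (num_bits : Int) : ∀ (bs : List Int) (bsn cur : Int) (out : List Int),
    1 ≤ bsn → bsn ≤ num_bits →
    bs.foldl (fun (st : Int × Int × List Int) b => streamBitsInner num_bits 8 b 8 st.1 st.2.1 st.2.2) (bsn, cur, out)
      = (fun s => (num_bits - s.2.1, s.1, s.2.2)) (bs.foldl (altByteStep num_bits) (cur, num_bits - bsn, out)) := by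
  intro bs
  induction bs with
  | nil =>
    intro bsn cur out h1 h2
    simp [sub_sub_cancel]
  | cons b bs ih =>
    intro bsn cur out h1 h2
    simp only [List.foldl_cons]
    have hinner := inner_eq num_bits 8 8 b bsn cur out le_rfl h1 h2
    rw [show ((8:Nat):Int) = (8:Int) from rfl] at hinner
    rw [hinner]
    rw [altByteStep_eq_nBit num_bits b cur (num_bits - bsn) out]
    have hinv := nBit_inv num_bits 8 b cur (num_bits - bsn) out (by omega) (by omega)
    dsimp only
    rw [ih (num_bits - (nBit num_bits 8 b cur (num_bits - bsn) out).2.2.1)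
      (nBit num_bits 8 b cur (num_bits - bsn) out).2.1
      (nBit num_bits 8 b cur (num_bits - bsn) out).2.2.2
      (by omega) (by omega)]
    rw [sub_sub_cancel]

-- ===== VERDICT (by name: the statement is the Claim_ definition above) =====
theorem stream_bits_spec : Claim_equal_stream_bits := by
  intro bs num_bits _hdom hpre
  have hn : 1 ≤ num_bits := hpre
  unfold Spec_stream_bits stream_bits stream_bits_alt
  rw [if_neg (show ¬ num_bits < 1 from by omega)]
  have h := fold_eq num_bits bs num_bits 0 [] hn le_rfl
  simp only [sub_self] at h
  rw [h]
  set t := bs.foldl (altByteStep num_bits) (0, 0, []) with ht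
  simp only []
  by_cases hc : t.2.1 > 0
  · rw [if_pos (by omega), if_pos hc]
  · rw [if_neg (by omega), if_neg hc]
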